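-- pv_equiv track=rewrite | github.com/muhammedasadn/ai_git_agent | ai_engine.py | _extract_meaningful_diff
-- ===== SOURCE A (Python) =====
-- def _extract_meaningful_diff(repo_state: dict, files: list = None) -> str:
--     """
--     Extract changed lines (+/-) from diff for AI analysis.
--     For new untracked files: read their content.
--     """
--     diff        = repo_state.get("diff", "")
--     staged_diff = repo_state.get("staged_diff", "")
--     untracked   = repo_state.get("untracked_content", "")
--     active_diff = diff or staged_diff
--
--     # Filter to specific files if given
--     if files and active_diff:
--         sections, current, in_rel = [], [], False
--         for line in active_diff.splitlines():
--             if line.startswith("diff --git"):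
--                 if in_rel and current:
--                     sections.extend(current)
--                 current = [line]
--                 in_rel  = any(f in line for f in files)
--             else:
--                 current.append(line)
--         if in_rel and current:
--             sections.extend(current)
--         active_diff = "\n".join(sections)
--
--     parts = []
--
--     if active_diff:
--         changed = []
--         for line in active_diff.splitlines():
--             if any(line.startswith(p) for p in
--                    ("diff --git", "--- ", "+++ ", "@@", "+", "-")):
--                 changed.append(line)
--         if changed:
--             parts.append("=== CODE DIFF (+ added / - removed) ===")
--             parts.append("\n".join(changed[:300]))
--
--     if untracked:
--         parts.append("=== NEW FILE CONTENTS ===")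
--         parts.append(untracked[:2000])
--
--     return "\n\n".join(parts) if parts else "(no diff available)"
-- ===== SOURCE B (Python) =====
-- def _extract_meaningful_diff(repo_state: dict, files: list = None) -> str:
--     """Partition-then-filter re-implementation: split the diff into header-led
--     sections and filter whole sections; assemble the report from two blocks."""
--     untracked = repo_state.get("untracked_content", "")
--     active_diff = repo_state.get("diff", "") or repo_state.get("staged_diff", "")
--
--     if files and active_diff:
--         sections = []
--         for line in active_diff.splitlines():
--             if line.startswith("diff --git"):
--                 sections.append([line])
--             elif sections:
--                 sections[-1].append(line)
--         kept = [sec for sec in sections if any(f in sec[0] for f in files)]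
--         active_diff = "\n".join(ln for sec in kept for ln in sec)
--
--     body = ""
--     if active_diff:
--         changed = [line for line in active_diff.splitlines()
--                    if line.startswith(("diff --git", "--- ", "+++ ", "@@", "+", "-"))]
--         if changed:
--             body = "=== CODE DIFF (+ added / - removed) ===\n\n" + "\n".join(changed[:300])
--
--     tail = "=== NEW FILE CONTENTS ===\n\n" + untracked[:2000] if untracked else ""
--
--     if body and tail:
--         return body + "\n\n" + tail
--     return body or tail or "(no diff available)"
-- ===== Notes on version B (the rewrite author's own statement) =====
-- stated objective: alternative
-- what changed: The streaming state-machine that filters diff sections (sections/current/in_rel accumulators flushed at each header) is replaced by partitioning the lines into header-led sections and filtering whole sections by their header afterwards, and the final report is assembled from two string blocks instead of a flat parts list.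
import Mathlib
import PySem

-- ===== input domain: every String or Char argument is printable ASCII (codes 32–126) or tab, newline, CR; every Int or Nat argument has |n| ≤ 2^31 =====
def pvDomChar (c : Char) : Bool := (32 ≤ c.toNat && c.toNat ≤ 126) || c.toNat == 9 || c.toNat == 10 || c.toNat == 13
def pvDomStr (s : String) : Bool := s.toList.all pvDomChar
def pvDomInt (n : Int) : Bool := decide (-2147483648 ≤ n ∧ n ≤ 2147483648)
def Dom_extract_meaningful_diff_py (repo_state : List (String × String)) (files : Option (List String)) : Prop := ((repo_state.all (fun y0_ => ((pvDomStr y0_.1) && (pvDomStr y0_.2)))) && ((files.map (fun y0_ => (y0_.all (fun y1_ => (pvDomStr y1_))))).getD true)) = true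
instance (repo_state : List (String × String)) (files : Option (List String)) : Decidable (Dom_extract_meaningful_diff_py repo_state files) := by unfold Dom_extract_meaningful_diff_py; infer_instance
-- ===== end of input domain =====

-- B replaces A's streaming state-machine file filter by partition-into-sections-then-filter
-- and assembles the report from two blocks instead of a parts list (objective: alternative).

-- ===== PORT A =====
-- shared named predicates (the Python inlines these lambdas)
def pvIsHeader (line : String) : Bool := PySem.Str.startswith line "diff --git"
def pvRel (fs : List String) (line : String) : Bool := fs.any (fun f => PySem.Str.isIn f line)
def pvIsChanged (line : String) : Bool :=
  ["diff --git", "--- ", "+++ ", "@@", "+", "-"].any (fun p => PySem.Str.startswith line p)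

-- one iteration of A's 'for line in active_diff.splitlines()' state machine
def pvAStep (fs : List String) (st : List String × List String × Bool) (line : String) :
    List String × List String × Bool :=
  if pvIsHeader line then
    ((if st.2.2 && !st.2.1.isEmpty then st.1 ++ st.2.1 else st.1), [line], pvRel fs line)
  else (st.1, st.2.1 ++ [line], st.2.2)

def extract_meaningful_diff_py (repo_state : List (String × String)) (files : Option (List String)) : String :=
  let rs := PySem.Dict.mk repo_state
  let diff := rs.getD "diff" ""
  let staged_diff := rs.getD "staged_diff" ""
  let untracked := rs.getD "untracked_content" ""
  let active0 := if diff == "" then staged_diff else diff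
  let active_diff :=
    match files with
    | some fs =>
        if !fs.isEmpty && !(active0 == "") then
          let st := (PySem.Str.splitlines active0).foldl (pvAStep fs) ([], [], false)
          PySem.Str.join "\n" (if st.2.2 && !st.2.1.isEmpty then st.1 ++ st.2.1 else st.1)
        else active0
    | none => active0
  let parts : List String :=
    if !(active_diff == "") then
      let changed := (PySem.Str.splitlines active_diff).foldl
        (fun acc line => if pvIsChanged line then acc ++ [line] else acc) []
      if !changed.isEmpty then
        ["=== CODE DIFF (+ added / - removed) ===", PySem.Str.join "\n" (changed.take 300)]
      else []
    else []
  let parts := if !(untracked == "") then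
      parts ++ ["=== NEW FILE CONTENTS ===", PySem.Str.slice untracked none (some 2000)]
    else parts
  if !parts.isEmpty then PySem.Str.join "\n\n" parts else "(no diff available)"

-- ===== PORT B =====
-- one iteration of B's partition loop: start a new section at a header, else extend the last
def pvBStep (secs : List (List String)) (line : String) : List (List String) :=
  if pvIsHeader line then secs ++ [[line]]
  else if !secs.isEmpty then secs.dropLast ++ [(secs.getLast?.getD []) ++ [line]]
  else secs

def extract_meaningful_diff_py_alt (repo_state : List (String × String)) (files : Option (List String)) : String :=
  let rs := PySem.Dict.mk repo_state
  let untracked := rs.getD "untracked_content" ""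
  let active0 := if rs.getD "diff" "" == "" then rs.getD "staged_diff" "" else rs.getD "diff" ""
  let active_diff :=
    match files with
    | some fs =>
        if !fs.isEmpty && !(active0 == "") then
          let sections := (PySem.Str.splitlines active0).foldl pvBStep []
          let kept := sections.filter (fun sec => pvRel fs (sec.headD ""))
          PySem.Str.join "\n" kept.flatten
        else active0
    | none => active0
  let body :=
    if !(active_diff == "") then
      let changed := (PySem.Str.splitlines active_diff).filter pvIsChanged
      if !changed.isEmpty then
        "=== CODE DIFF (+ added / - removed) ===" ++ "\n\n" ++ PySem.Str.join "\n" (changed.take 300)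
      else ""
    else ""
  let tail :=
    if !(untracked == "") then
      "=== NEW FILE CONTENTS ===" ++ "\n\n" ++ PySem.Str.slice untracked none (some 2000)
    else ""
  if !(body == "") && !(tail == "") then body ++ "\n\n" ++ tail
  else if !(body == "") then body
  else if !(tail == "") then tail
  else "(no diff available)"

-- ===== PRECONDITION & SPEC =====
def Spec_extract_meaningful_diff_py (repo_state : List (String × String)) (files : Option (List String)) (out : String) : Prop := out = extract_meaningful_diff_py_alt repo_state files
instance (repo_state : List (String × String)) (files : Option (List String)) (out : String) : Decidable (Spec_extract_meaningful_diff_py repo_state files out) := by unfold Spec_extract_meaningful_diff_py; infer_instance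

-- ===== CLAIM (what is proved, stated in full; the proofs are below) =====
def Claim_equal_extract_meaningful_diff_py : Prop := ∀ (repo_state : List (String × String)) (files : Option (List String)), Dom_extract_meaningful_diff_py repo_state files → Spec_extract_meaningful_diff_py repo_state files (extract_meaningful_diff_py repo_state files)

-- ===== LEMMAS AND PROOFS =====

-- A's end-of-loop flush
def pvAFin (st : List String × List String × Bool) : List String :=
  if st.2.2 && !st.2.1.isEmpty then st.1 ++ st.2.1 else st.1

-- B's end: filter relevant sections and flatten
def pvBFin (fs : List String) (secs : List (List String)) : List String :=
  (secs.filter (fun sec => pvRel fs (sec.headD ""))).flatten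

lemma pvA_acc (fs : List String) (lines : List String) :
    ∀ sA cur rel, pvAFin (lines.foldl (pvAStep fs) (sA, cur, rel))
      = sA ++ pvAFin (lines.foldl (pvAStep fs) ([], cur, rel)) := by
  induction lines with
  | nil => intro sA cur rel; simp [pvAFin]; split_ifs <;> simp
  | cons line rest ih =>
      intro sA cur rel
      simp only [List.foldl_cons, pvAStep]
      split_ifs with h h2
      · rw [ih, ih ([] ++ cur)]; simp
      · exact ih sA [line] (pvRel fs line)
      · exact ih sA (cur ++ [line]) rel

lemma pvB_acc (lines : List String) :
    ∀ done ne, ne ≠ [] → lines.foldl pvBStep (done ++ ne) = done ++ lines.foldl pvBStep ne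
      ∧ lines.foldl pvBStep ne ≠ [] := by
  induction lines with
  | nil => intro done ne h; exact ⟨rfl, h⟩
  | cons line rest ih =>
      intro done ne h
      simp only [List.foldl_cons, pvBStep]
      by_cases h1 : pvIsHeader line = true
      · simp only [if_pos h1]
        rw [List.append_assoc]
        exact ih done (ne ++ [[line]]) (by simp)
      · have hne : (!(done ++ ne).isEmpty) = true := by
          cases ne with
          | nil => exact absurd rfl h
          | cons a t => simp
        have hne2 : (!ne.isEmpty) = true := by
          cases ne with
          | nil => exact absurd rfl h
          | cons a t => simp
        simp only [if_neg h1, hne, hne2, if_true]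
        rw [List.dropLast_append_of_ne_nil h, List.getLast?_append_of_ne_nil done h,
          List.append_assoc]
        exact ih done (ne.dropLast ++ [ne.getLast?.getD [] ++ [line]]) (by simp)

lemma pvBFin_append (fs : List String) (xs ys : List (List String)) :
    pvBFin fs (xs ++ ys) = pvBFin fs xs ++ pvBFin fs ys := by
  simp [pvBFin]

lemma pvBFin_singleton (fs : List String) (cur : List String) :
    pvBFin fs [cur] = if pvRel fs (cur.headD "") = true then cur else [] := by
  unfold pvBFin
  rw [List.filter_singleton]
  cases hr : pvRel fs (cur.headD "") <;> simp [hr]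

lemma pv_insec (fs : List String) (lines : List String) :
    ∀ cur, cur ≠ [] →
      pvAFin (lines.foldl (pvAStep fs) ([], cur, pvRel fs (cur.headD "")))
        = pvBFin fs (lines.foldl pvBStep [cur]) := by
  induction lines with
  | nil =>
      intro cur h
      have hne : (!cur.isEmpty) = true := by
        cases cur with
        | nil => exact absurd rfl h
        | cons a t => simp
      simp only [List.foldl, pvAFin, pvBFin_singleton, hne, Bool.and_true]
      split_ifs <;> simp
  | cons line rest ih =>
      intro cur h
      have hne : (!cur.isEmpty) = true := by
        cases cur with
        | nil => exact absurd rfl h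
        | cons a t => simp
      simp only [List.foldl_cons, pvAStep, pvBStep]
      by_cases h1 : pvIsHeader line = true
      · simp only [if_pos h1, hne, Bool.and_true]
        rw [pvA_acc]
        rw [(pvB_acc rest [cur] [[line]] (by simp)).1, pvBFin_append]
        have ih' := ih [line] (by simp)
        simp only [List.headD_cons] at ih'
        rw [ih', pvBFin_singleton]
        simp
      · have hh : (cur ++ [line]).headD "" = cur.headD "" := by
          cases cur with
          | nil => exact absurd rfl h
          | cons a t => rfl
        have ih' := ih (cur ++ [line]) (by simp)
        rw [hh] at ih'
        simp only [if_neg h1]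
        simpa using ih'

lemma pv_preamble (fs : List String) (lines : List String) :
    ∀ cur, pvAFin (lines.foldl (pvAStep fs) ([], cur, false))
      = pvBFin fs (lines.foldl pvBStep []) := by
  induction lines with
  | nil => intro cur; simp [pvAFin, pvBFin]
  | cons line rest ih =>
      intro cur
      simp only [List.foldl_cons, pvAStep, pvBStep]
      by_cases h1 : pvIsHeader line = true
      · simp only [if_pos h1, Bool.false_and]
        rw [if_neg (by simp)]
        have := pv_insec fs rest [line] (by simp)
        simp only [List.headD_cons] at this
        simpa using this
      · simp only [if_neg h1]
        exact ih (cur ++ [line])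

-- the two file filters agree
lemma pv_filter_eq (fs : List String) (lines : List String) :
    pvAFin (lines.foldl (pvAStep fs) ([], [], false)) = pvBFin fs (lines.foldl pvBStep []) :=
  pv_preamble fs lines []

-- a string starting with the literal block header is never empty
lemma pv_hdr_ne (h s : String) (hh : h.toList ≠ []) : ¬ (h ++ "\n\n" ++ s) = "" := by
  intro he
  have h2 := congrArg String.toList he
  rw [String.toList_append, String.toList_append] at h2
  cases hd : h.toList with
  | nil => exact hh hd
  | cons a t => rw [hd] at h2; simp at h2

-- assembling from the parts list and from the two blocks agree
lemma pv_tail_eq (c j u t : String) (hc : c.toList ≠ []) (hu : u.toList ≠ []) :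
    ∀ (changed : List String) (untracked : String),
    (let parts : List String := if !changed.isEmpty then [c, j] else []
     let parts := if !(untracked == "") then parts ++ [u, t] else parts
     if !parts.isEmpty then PySem.Str.join "\n\n" parts else "(no diff available)")
    = (let body := if !changed.isEmpty then c ++ "\n\n" ++ j else ""
       let tail := if !(untracked == "") then u ++ "\n\n" ++ t else ""
       if !(body == "") && !(tail == "") then body ++ "\n\n" ++ tail
       else if !(body == "") then body
       else if !(tail == "") then tail
       else "(no diff available)") := by
  intro changed untracked
  by_cases h1 : changed.isEmpty <;> by_cases h2 : (untracked == "") <;>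
    simp only [h1, h2, Bool.not_true, Bool.not_false, if_true, if_false,
      List.nil_append, List.append_nil] <;>
    simp [PySem.Str.join, pv_hdr_ne c j hc, pv_hdr_ne u t hu, beq_iff_eq] <;>
    (apply String.ext ;
     simp [PySem.Chars.join, String.toList_append, List.intercalate, List.intersperse])

-- the filtered active diff, both ways
def pvActiveA (fs : List String) (s : String) : String :=
  PySem.Str.join "\n" (pvAFin ((PySem.Str.splitlines s).foldl (pvAStep fs) ([], [], false)))

def pvActiveB (fs : List String) (s : String) : String :=
  PySem.Str.join "\n" (pvBFin fs ((PySem.Str.splitlines s).foldl pvBStep []))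

lemma pv_active (fs : List String) (s : String) : pvActiveA fs s = pvActiveB fs s := by
  unfold pvActiveA pvActiveB
  rw [pv_filter_eq]

-- the report assembly, both ways
def pvTailA (ad u : String) : String :=
  let parts : List String :=
    if !(ad == "") then
      let changed := (PySem.Str.splitlines ad).foldl
        (fun acc line => if pvIsChanged line then acc ++ [line] else acc) []
      if !changed.isEmpty then
        ["=== CODE DIFF (+ added / - removed) ===", PySem.Str.join "\n" (changed.take 300)]
      else []
    else []
  let parts := if !(u == "") then
      parts ++ ["=== NEW FILE CONTENTS ===", PySem.Str.slice u none (some 2000)]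
    else parts
  if !parts.isEmpty then PySem.Str.join "\n\n" parts else "(no diff available)"

def pvTailB (ad u : String) : String :=
  let body :=
    if !(ad == "") then
      let changed := (PySem.Str.splitlines ad).filter pvIsChanged
      if !changed.isEmpty then
        "=== CODE DIFF (+ added / - removed) ===" ++ "\n\n" ++ PySem.Str.join "\n" (changed.take 300)
      else ""
    else ""
  let tail :=
    if !(u == "") then
      "=== NEW FILE CONTENTS ===" ++ "\n\n" ++ PySem.Str.slice u none (some 2000)
    else ""
  if !(body == "") && !(tail == "") then body ++ "\n\n" ++ tail
  else if !(body == "") then body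
  else if !(tail == "") then tail
  else "(no diff available)"

-- the two report assemblies agree for the same filtered diff and untracked content
lemma pv_assemble (ad u : String) : pvTailA ad u = pvTailB ad u := by
  unfold pvTailA pvTailB
  have hc : ("=== CODE DIFF (+ added / - removed) ===" : String).toList ≠ [] := by decide
  have hu : ("=== NEW FILE CONTENTS ===" : String).toList ≠ [] := by decide
  by_cases had : (ad == "") = true
  · simpa [had] using
      pv_tail_eq "=== CODE DIFF (+ added / - removed) ===" (PySem.Str.join "\n" (([] : List String).take 300))
        "=== NEW FILE CONTENTS ===" (PySem.Str.slice u none (some 2000)) hc hu [] u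
  · have heq : (PySem.Str.splitlines ad).foldl
        (fun acc line => if pvIsChanged line then acc ++ [line] else acc) []
        = (PySem.Str.splitlines ad).filter pvIsChanged := by
      simpa using PySem.List.foldl_append_if pvIsChanged id (PySem.Str.splitlines ad) []
    simp only [had, Bool.not_false, if_true, if_false, heq]
    exact pv_tail_eq "=== CODE DIFF (+ added / - removed) ==="
      (PySem.Str.join "\n" (((PySem.Str.splitlines ad).filter pvIsChanged).take 300))
      "=== NEW FILE CONTENTS ===" (PySem.Str.slice u none (some 2000)) hc hu
      ((PySem.Str.splitlines ad).filter pvIsChanged) u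

-- ===== VERDICT (by name: the statement is the Claim_ definition above) =====
theorem extract_meaningful_diff_py_spec : Claim_equal_extract_meaningful_diff_py := by
  intro repo_state files _
  unfold Spec_extract_meaningful_diff_py extract_meaningful_diff_py extract_meaningful_diff_py_alt
  cases files with
  | none => exact pv_assemble _ _
  | some fs =>
      by_cases hf : (!fs.isEmpty &&
          !((if (PySem.Dict.mk repo_state).getD "diff" "" == "" then
              (PySem.Dict.mk repo_state).getD "staged_diff" ""
            else (PySem.Dict.mk repo_state).getD "diff" "") == "")) = true
      · show pvTailA (if _ then pvActiveA fs _ else _) _ = pvTailB (if _ then pvActiveB fs _ else _) _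
        rw [if_pos hf, if_pos hf, pv_active]
        exact pv_assemble _ _
      · show pvTailA (if _ then pvActiveA fs _ else _) _ = pvTailB (if _ then pvActiveB fs _ else _) _
        rw [if_neg hf, if_neg hf]
        exact pv_assemble _ _
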